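-- pv_equiv track=rewrite | github.com/GEM-benchmark/NL-Augmenter | transformations/noun_compound_paraphraser/transformation.py | noun_compound_paraphraser
-- ===== SOURCE A (Python) =====
-- def noun_compound_paraphraser(text, compounds):
--
--     L = [[text]]
--     for k in compounds.keys():
--         if k in L[0][0]:
--             new = []
--             for l in L:
--                 for text in l:
--                     n = [text.replace(k,paraphrase[0]) for paraphrase in compounds[k]]
--                     new.extend(n)
--             L.append(new)
--     # Flatten the list and ignore the first (the original text)
--     paraphrases = [x for u in L[1:] for x in u]
--
--     return paraphrases
-- ===== SOURCE B (Python) =====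
-- def noun_compound_paraphraser(text, compounds):
--     # Enumerate subsets of the matching keys by binary counting: each mask in
--     # [1, 2**m) names which keys to substitute, and each paraphrase string is
--     # rebuilt directly from the original text (no growing accumulator).
--     ks = [(k, [p[0] for p in ps]) for k, ps in compounds.items() if k in text]
--     out = []
--     for mask in range(1, 2 ** len(ks)):
--         strings = [text]
--         bits = mask
--         for k, ps in ks:
--             bits, b = divmod(bits, 2)
--             if b:
--                 strings = [s.replace(k, p) for s in strings for p in ps]
--         out.extend(strings)
--     return out
-- ===== Notes on version B (the rewrite author's own statement) =====
-- stated objective: alternative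
-- what changed: Replaces A's multiplicative accumulator (each tier built from all previously generated strings) by binary-counting enumeration of subsets of the matching keys, rebuilding every paraphrase independently from the original text via divmod bit extraction.
import Mathlib
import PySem

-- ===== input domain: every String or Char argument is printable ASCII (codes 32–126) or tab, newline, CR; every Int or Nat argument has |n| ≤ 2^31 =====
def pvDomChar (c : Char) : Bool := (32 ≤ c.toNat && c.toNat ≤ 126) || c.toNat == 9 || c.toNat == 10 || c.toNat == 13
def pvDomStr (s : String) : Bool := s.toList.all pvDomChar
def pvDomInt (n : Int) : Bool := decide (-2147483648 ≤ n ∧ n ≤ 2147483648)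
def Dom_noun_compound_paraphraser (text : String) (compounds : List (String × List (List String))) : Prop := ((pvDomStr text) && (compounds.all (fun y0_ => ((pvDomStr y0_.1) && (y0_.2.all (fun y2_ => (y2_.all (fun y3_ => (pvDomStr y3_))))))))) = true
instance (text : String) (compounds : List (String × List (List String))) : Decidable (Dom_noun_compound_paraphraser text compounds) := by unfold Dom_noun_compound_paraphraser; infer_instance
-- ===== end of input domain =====

-- B enumerates subsets of the matching keys by binary counting and rebuilds each paraphrase from the original text, instead of A's multiplicative tier accumulator (alternative algorithm, same cost and order).


-- ===== PORT A =====
-- literal transliteration of A: L = [[text]]; per key (dict as PySem.Dict, keys in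
-- insertion order), if k in L[0][0]: build `new` by the nested extend loop and append
-- it as a new tier; finally flatten L[1:]. paraphrase[0] is pyGetD (Pre_ rules out []).
def noun_compound_paraphraser (text : String) (compounds : List (String × List (List String))) : List String :=
  let d := PySem.Dict.ofList compounds
  let L : List (List String) :=
    d.keys.foldl (fun L k =>
      if PySem.Str.isIn k (PySem.List.pyGetD (PySem.List.pyGetD L 0 []) 0 "") then
        L ++ [L.foldl (fun new l =>
                l.foldl (fun new t =>
                  new ++ (d.getD k []).map
                    (fun paraphrase => PySem.Str.replace t k (PySem.List.pyGetD paraphrase 0 ""))) new) []]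
      else L) [[text]]
  (PySem.List.slice L (some 1) none).flatten

-- ===== PORT B =====
-- literal transliteration of B: ks = [(k, [p[0] for p in ps]) for k, ps in items if k in text];
-- for mask in range(1, 2**len(ks)): strings = [text]; bits = mask;
-- for (k, ps) in ks: bits, b = divmod(bits, 2); if b: strings = [s.replace(k, p) for s in strings for p in ps];
-- out.extend(strings). `divmod(bits, 2)` is (floordiv, mod); `if b:` is b != 0.
def noun_compound_paraphraser_alt (text : String) (compounds : List (String × List (List String))) : List String :=
  let ks : List (String × List String) :=
    ((PySem.Dict.ofList compounds).items.filter (fun kv => PySem.Str.isIn kv.1 text)).map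
      (fun kv => (kv.1, kv.2.map (fun p => PySem.List.pyGetD p 0 "")))
  (PySem.List.pyRange 1 (2 ^ ks.length) 1).foldl (fun out mask =>
    out ++ (ks.foldl (fun sb kp =>
        let b := PySem.Int.mod sb.2 2
        ((if b ≠ 0 then sb.1.flatMap (fun s => kp.2.map (fun p => PySem.Str.replace s kp.1 p)) else sb.1),
         PySem.Int.floordiv sb.2 2))
      (([text], mask))).1) []

-- ===== PRECONDITION & SPEC =====
-- A raises IndexError on paraphrase[0] when a key occurring in the text maps to a list
-- containing an empty paraphrase list; Pre_ excludes exactly those inputs (B raises there too).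
def Pre_noun_compound_paraphraser (text : String) (compounds : List (String × List (List String))) : Prop :=
  ∀ kv ∈ (PySem.Dict.ofList compounds).items, PySem.Str.isIn kv.1 text = true → ∀ p ∈ kv.2, p ≠ []
instance (text : String) (compounds : List (String × List (List String))) : Decidable (Pre_noun_compound_paraphraser text compounds) := by unfold Pre_noun_compound_paraphraser; infer_instance
def pvWitness_noun_compound_paraphraser : String × (List (String × List (List String))) :=
  ("the olive oil is good", [("olive oil", [["oil from olives"], ["vegetable oil"]])])
def Spec_noun_compound_paraphraser (text : String) (compounds : List (String × List (List String))) (out : List String) : Prop := out = noun_compound_paraphraser_alt text compounds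
instance (text : String) (compounds : List (String × List (List String))) (out : List String) : Decidable (Spec_noun_compound_paraphraser text compounds out) := by unfold Spec_noun_compound_paraphraser; infer_instance

-- ===== CLAIM (what is proved, stated in full; the proofs are below) =====
def Claim_equal_noun_compound_paraphraser : Prop := ∀ (text : String) (compounds : List (String × List (List String))), Dom_noun_compound_paraphraser text compounds → Pre_noun_compound_paraphraser text compounds → Spec_noun_compound_paraphraser text compounds (noun_compound_paraphraser text compounds)

-- ===== LEMMAS AND PROOFS =====

-- single-key expansion step shared by the reasoning below
def ncpExp (kp : String × List String) (strs : List String) : List String :=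
  strs.flatMap (fun s => kp.2.map (fun p => PySem.Str.replace s kp.1 p))

-- B's inner loop on the Nat side: apply the keys selected by the bits of n
def ncpMask : List (String × List String) → Nat → List String → List String
  | [], _, strs => strs
  | kp :: ks, n, strs => ncpMask ks (n / 2) (if n % 2 = 1 then ncpExp kp strs else strs)

lemma ncp_flatMap_flatten (g : String → List String) (L : List (List String)) :
    List.flatMap g L.flatten = List.flatMap (List.flatMap g) L := by
  induction L with
  | nil => simp
  | cons l L ih => simp [List.flatMap_append, ih]

-- A's nested extend loop over the tiers builds exactly flatten-then-flatMap.
lemma ncp_new_eq (L : List (List String)) (g : String → List String) :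
    L.foldl (fun new l => l.foldl (fun new t => new ++ g t) new) [] = L.flatten.flatMap g := by
  have h : ∀ (L : List (List String)) (a : List String),
      L.foldl (fun new l => l.foldl (fun new t => new ++ g t) new) a = a ++ L.flatten.flatMap g := by
    intro L
    induction L with
    | nil => intro a; simp
    | cons l L ih =>
        intro a
        simp only [List.foldl_cons, PySem.List.foldl_append_eq_flatMap]
        simp [ncp_flatMap_flatten, List.flatMap_append]
  simpa using h L []

-- loop invariant: the flat multiplicative accumulator is the flatten of A's list of
-- tiers, whose head stays [text].
lemma ncp_loop (text : String) (g : String → String → List String) :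
    ∀ (ks : List String) (L : List (List String)) (rest : List (List String)), L = [text] :: rest →
      ks.foldl (fun acc k =>
        if PySem.Str.isIn k text then
          acc ++ acc.flatMap (g k)
        else acc) L.flatten
      = (ks.foldl (fun L k =>
          if PySem.Str.isIn k (PySem.List.pyGetD (PySem.List.pyGetD L 0 []) 0 "") then
            L ++ [L.foldl (fun new l => l.foldl (fun new t => new ++ g k t) new) ([] : List String)]
          else L) L).flatten ∧
        ∃ rest', (ks.foldl (fun L k =>
          if PySem.Str.isIn k (PySem.List.pyGetD (PySem.List.pyGetD L 0 []) 0 "") then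
            L ++ [L.foldl (fun new l => l.foldl (fun new t => new ++ g k t) new) ([] : List String)]
          else L) L) = [text] :: rest' := by
  intro ks
  induction ks with
  | nil => intro L rest hL; exact ⟨rfl, rest, hL⟩
  | cons k ks ih =>
      intro L rest hL
      rw [List.foldl_cons, List.foldl_cons]
      have hguard : PySem.List.pyGetD (PySem.List.pyGetD L 0 ([] : List String)) 0 "" = text := by
        rw [hL]; simp [PySem.List.pyGetD_zero_cons]
      rw [hguard]
      by_cases hk : PySem.Str.isIn k text
      · rw [if_pos hk, if_pos hk]
        have hnew := ncp_new_eq L (g k)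
        have hstate : L.flatten ++ L.flatten.flatMap (g k)
            = (L ++ [L.foldl (fun new l => l.foldl (fun new t => new ++ g k t) new) ([] : List String)]).flatten := by
          rw [hnew, List.flatten_append]; simp
        rw [hstate]
        exact ih _ (rest ++ [L.foldl (fun new l => l.foldl (fun new t => new ++ g k t) new) ([] : List String)])
          (by rw [hL]; simp)
      · rw [if_neg hk, if_neg hk]
        exact ih L rest hL

-- ncpMask only looks at the bits of n below the length of ks
lemma ncpMask_congr (ks : List (String × List String)) :
    ∀ (n n' : Nat) (strs : List String), n % 2 ^ ks.length = n' % 2 ^ ks.length →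
      ncpMask ks n strs = ncpMask ks n' strs := by
  induction ks with
  | nil => intro n n' strs _; rfl
  | cons kp ks ih =>
      intro n n' strs h
      have h2 : (2 : Nat) ^ (kp :: ks).length = 2 ^ ks.length * 2 := by
        simp [pow_succ]
      rw [h2] at h
      have hlow : n % 2 = n' % 2 := by
        have := congrArg (· % 2) h
        simpa [Nat.mod_mul_left_mod, Nat.mod_mod_of_dvd _ (Dvd.intro _ rfl)] using this
      have hhigh : n / 2 % 2 ^ ks.length = n' / 2 % 2 ^ ks.length := by
        have h2' : (2 : Nat) ^ ks.length * 2 = 2 * 2 ^ ks.length := by ring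
        rw [h2'] at h
        calc n / 2 % 2 ^ ks.length = n % (2 * 2 ^ ks.length) / 2 := (Nat.mod_mul_right_div_self n 2 _).symm
        _ = n' % (2 * 2 ^ ks.length) / 2 := by rw [h]
        _ = n' / 2 % 2 ^ ks.length := Nat.mod_mul_right_div_self n' 2 _
      simp only [ncpMask, hlow, ih _ _ _ hhigh]

lemma ncpMask_append (ks : List (String × List String)) (kp : String × List String) :
    ∀ (n : Nat) (strs : List String),
      ncpMask (ks ++ [kp]) n strs
        = if n / 2 ^ ks.length % 2 = 1 then ncpExp kp (ncpMask ks n strs) else ncpMask ks n strs := by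
  induction ks with
  | nil => intro n strs; simp [ncpMask]
  | cons kq ks ih =>
      intro n strs
      simp only [List.cons_append, ncpMask, ih, Nat.div_div_eq_div_mul, List.length_cons]
      have : n / (2 * 2 ^ ks.length) = n / 2 ^ (ks.length + 1) := by
        rw [pow_succ]; ring_nf
      rw [this]

-- the core correspondence: binary counting over all 2^m masks enumerates exactly the
-- multiplicative accumulator, in the same order
lemma ncp_mask_enum (text : String) (ks : List (String × List String)) :
    (List.range (2 ^ ks.length)).flatMap (fun n => ncpMask ks n [text])
      = ks.foldl (fun acc kp => acc ++ ncpExp kp acc) [text] := by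
  induction ks using List.reverseRecOn with
  | nil => simp [ncpMask]
  | append_singleton ks kp ih =>
      have hsplit : (2 : Nat) ^ (ks ++ [kp]).length = 2 ^ ks.length + 2 ^ ks.length := by
        simp [pow_succ]; ring
      rw [hsplit, List.range_add, List.flatMap_append, List.flatMap_map, List.foldl_append]
      have hfst : (List.range (2 ^ ks.length)).flatMap (fun n => ncpMask (ks ++ [kp]) n [text])
          = (List.range (2 ^ ks.length)).flatMap (fun n => ncpMask ks n [text]) := by
        refine List.flatMap_congr (fun n hn => ?_)
        rw [ncpMask_append]
        have h0 : n / 2 ^ ks.length = 0 := Nat.div_eq_of_lt (List.mem_range.mp hn)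
        simp [h0]
      have hsnd : (List.range (2 ^ ks.length)).flatMap
            (fun n => ncpMask (ks ++ [kp]) (2 ^ ks.length + n) [text])
          = (List.range (2 ^ ks.length)).flatMap (fun n => ncpExp kp (ncpMask ks n [text])) := by
        refine List.flatMap_congr (fun n hn => ?_)
        rw [ncpMask_append]
        have hn' : n < 2 ^ ks.length := List.mem_range.mp hn
        have h1 : (2 ^ ks.length + n) / 2 ^ ks.length = 1 := by
          rw [Nat.add_comm, Nat.add_div_right _ (Nat.two_pow_pos _),
            Nat.div_eq_of_lt hn']
        rw [h1]
        simp only [Nat.one_mod, if_pos]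
        rw [ncpMask_congr ks (2 ^ ks.length + n) n _ (Nat.add_mod_left _ _)]
      rw [hfst, hsnd, ih]
      congr 1
      rw [← ih]
      simp only [ncpExp, List.flatMap_assoc]

-- ncpMask with mask 0 applies nothing
lemma ncpMask_zero (ks : List (String × List String)) (strs : List String) :
    ncpMask ks 0 strs = strs := by
  induction ks with
  | nil => rfl
  | cons kp ks ih => simp [ncpMask, ih]

-- B's inner Int-state loop computes ncpMask of the nonnegative mask
lemma ncp_bits (ks : List (String × List String)) :
    ∀ (n : Nat) (strs : List String),
      (ks.foldl (fun sb kp =>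
          ((if PySem.Int.mod sb.2 2 ≠ 0 then
              sb.1.flatMap (fun s => kp.2.map (fun p => PySem.Str.replace s kp.1 p)) else sb.1),
           PySem.Int.floordiv sb.2 2)) (strs, (n : Int))).1
        = ncpMask ks n strs := by
  induction ks with
  | nil => intro n strs; rfl
  | cons kp ks ih =>
      intro n strs
      have hmod : PySem.Int.mod (n : Int) 2 = ((n % 2 : Nat) : Int) := by
        exact_mod_cast PySem.Int.mod_natCast n 2
      have hdiv : PySem.Int.floordiv (n : Int) 2 = ((n / 2 : Nat) : Int) := by
        exact_mod_cast PySem.Int.floordiv_natCast n 2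
      rw [List.foldl_cons]
      simp only [hmod, hdiv]
      rw [ih]
      have hcond : (((n % 2 : Nat) : Int) ≠ 0) = (n % 2 = 1) := by
        simp only [eq_iff_iff]; omega
      simp only [ncpMask, ncpExp, hcond]

-- ===== VERDICT (by name: the statement is the Claim_ definition above) =====
theorem noun_compound_paraphraser_spec : Claim_equal_noun_compound_paraphraser := by
  intro text compounds _ _
  unfold Spec_noun_compound_paraphraser noun_compound_paraphraser noun_compound_paraphraser_alt
  dsimp only
  obtain ⟨heq, rest', hform⟩ := ncp_loop text
      (fun k t => ((PySem.Dict.ofList compounds).getD k []).map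
        (fun paraphrase => PySem.Str.replace t k (PySem.List.pyGetD paraphrase 0 "")))
      (PySem.Dict.ofList compounds).keys [[text]] [] rfl
  simp only [List.flatten_cons, List.flatten_nil, List.append_nil] at heq
  rw [hform] at heq
  rw [hform, PySem.List.slice_from_one, List.tail_cons]
  rw [PySem.List.foldl_append_eq_flatMap, List.nil_append]
  simp only [List.flatten_cons] at heq
  -- names for the two intermediate shapes
  have hnodup := PySem.Dict.nodup_keys_ofList compounds
  have hitems := PySem.Dict.items_eq_map_keys (PySem.Dict.ofList compounds) hnodup ([] : List (List String))
  -- the filtered key/paraphrase list B precomputes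
  have hks : (List.map (fun kv => (kv.1, List.map (fun p => PySem.List.pyGetD p 0 "") kv.2))
        (List.filter (fun kv => PySem.Str.isIn kv.1 text) (PySem.Dict.ofList compounds).items))
      = List.map (fun k => (k, ((PySem.Dict.ofList compounds).getD k []).map (fun p => PySem.List.pyGetD p 0 "")))
          (List.filter (fun k => PySem.Str.isIn k text) (PySem.Dict.ofList compounds).keys) := by
    rw [hitems, List.filter_map, List.map_map]
    rfl
  rw [hks]
  -- B's mask loop equals the multiplicative accumulator over the filtered keys
  have hB : [text] ++ (PySem.List.pyRange 1 (2 ^ (List.map (fun k => (k, ((PySem.Dict.ofList compounds).getD k []).map (fun p => PySem.List.pyGetD p 0 "")))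
          (List.filter (fun k => PySem.Str.isIn k text) (PySem.Dict.ofList compounds).keys)).length)).flatMap
        (fun mask => (List.foldl
            (fun sb kp =>
              (if PySem.Int.mod sb.2 2 ≠ 0 then
                  List.flatMap (fun s => List.map (fun p => PySem.Str.replace s kp.1 p) kp.2) sb.1
                else sb.1,
                PySem.Int.floordiv sb.2 2))
            ([text], mask)
            (List.map (fun k => (k, ((PySem.Dict.ofList compounds).getD k []).map (fun p => PySem.List.pyGetD p 0 "")))
              (List.filter (fun k => PySem.Str.isIn k text) (PySem.Dict.ofList compounds).keys))).1)
      = List.foldl (fun acc kp => acc ++ ncpExp kp acc) [text]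
          (List.map (fun k => (k, ((PySem.Dict.ofList compounds).getD k []).map (fun p => PySem.List.pyGetD p 0 "")))
            (List.filter (fun k => PySem.Str.isIn k text) (PySem.Dict.ofList compounds).keys)) := by
    generalize (List.map (fun k => (k, ((PySem.Dict.ofList compounds).getD k []).map (fun p => PySem.List.pyGetD p 0 "")))
      (List.filter (fun k => PySem.Str.isIn k text) (PySem.Dict.ofList compounds).keys)) = ks
    have hcast : (2 : Int) ^ ks.length = ((2 ^ ks.length : Nat) : Int) := by push_cast; ring
    have hpos : (0 : Int) < 2 ^ ks.length := by positivity
    have hcons : PySem.List.pyRange 0 (2 ^ ks.length) = 0 :: PySem.List.pyRange 1 (2 ^ ks.length) := by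
      have := PySem.List.pyRange_one_cons hpos
      norm_num at this
      exact this
    have hfull : (PySem.List.pyRange 0 ((2 : Int) ^ ks.length)).flatMap
          (fun mask => (List.foldl
              (fun sb kp =>
                (if PySem.Int.mod sb.2 2 ≠ 0 then
                    List.flatMap (fun s => List.map (fun p => PySem.Str.replace s kp.1 p) kp.2) sb.1
                  else sb.1,
                  PySem.Int.floordiv sb.2 2))
              ([text], mask) ks).1)
        = (List.range (2 ^ ks.length)).flatMap (fun n => ncpMask ks n [text]) := by
      rw [hcast, PySem.List.pyRange_zero_natCast, List.flatMap_map]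
      exact List.flatMap_congr (fun n _ => ncp_bits ks n [text])
    rw [hcons] at hfull
    simp only [List.flatMap_cons] at hfull
    have h0 : (List.foldl
        (fun sb kp =>
          (if PySem.Int.mod sb.2 2 ≠ 0 then
              List.flatMap (fun s => List.map (fun p => PySem.Str.replace s kp.1 p) kp.2) sb.1
            else sb.1,
            PySem.Int.floordiv sb.2 2))
        ([text], (0 : Int)) ks).1 = [text] := by
      have := ncp_bits ks 0 [text]
      simp only [Nat.cast_zero] at this
      rw [this, ncpMask_zero]
    rw [h0] at hfull
    exact hfull.trans (ncp_mask_enum text ks)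
  have hgoal := hB
  -- the multiplicative accumulator over ks is A's flat accumulator over all keys
  have hAB : List.foldl (fun acc kp => acc ++ ncpExp kp acc) [text]
        (List.map (fun k => (k, ((PySem.Dict.ofList compounds).getD k []).map (fun p => PySem.List.pyGetD p 0 "")))
          (List.filter (fun k => PySem.Str.isIn k text) (PySem.Dict.ofList compounds).keys))
      = List.foldl
          (fun acc k =>
            if PySem.Str.isIn k text = true then
              acc ++ List.flatMap
                (fun t => List.map (fun paraphrase => PySem.Str.replace t k (PySem.List.pyGetD paraphrase 0 ""))
                  ((PySem.Dict.ofList compounds).getD k []))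
                acc
            else acc)
          [text] (PySem.Dict.ofList compounds).keys := by
    rw [List.foldl_map, List.foldl_filter]
    apply PySem.List.foldl_congr_mem
    intro acc k _
    simp only [ncpExp, List.map_map, Function.comp_def]
  rw [hAB, heq] at hgoal
  exact (List.append_cancel_left hgoal).symm
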